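-- pv_equiv track=rewrite | github.com/quad/advent-of-code-2018 | mikn/7.py | get_next_node
-- ===== SOURCE A (Python) =====
-- from operator import itemgetter
--
-- def get_next_node(dag, nodes, current_nodes):
--     sorted_dag = list(dag.items())
--     sorted_dag.sort(key=itemgetter(0))
--     for dep_node, pre_nodes in sorted_dag:
--         is_it_next_nodes = list(pre_nodes)
--         for node in nodes:
--             if node in current_nodes and node in is_it_next_nodes:
--                 is_it_next_nodes.remove(node)
--         if len(is_it_next_nodes) == 0:
--             del(dag[dep_node])
--             return dep_node
--     return None
-- ===== SOURCE B (Python) =====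
-- def get_next_node(dag, nodes, current_nodes):
--     avail = [n for n in nodes if n in current_nodes]
--     candidates = [k for k, pre in dag.items()
--                   if all(pre.count(v) <= avail.count(v) for v in pre)]
--     if not candidates:
--         return None
--     key = min(candidates)
--     del dag[key]
--     return key
-- ===== Notes on version B (the rewrite author's own statement) =====
-- stated objective: simpler
-- what changed: Replaces A's full sort of dag plus a destructive remove-one-occurrence simulation per entry with a single availability list built once, a count-comparison filter over dag, and min() over the satisfying keys (no sort, no removal loop).
import Mathlib
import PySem

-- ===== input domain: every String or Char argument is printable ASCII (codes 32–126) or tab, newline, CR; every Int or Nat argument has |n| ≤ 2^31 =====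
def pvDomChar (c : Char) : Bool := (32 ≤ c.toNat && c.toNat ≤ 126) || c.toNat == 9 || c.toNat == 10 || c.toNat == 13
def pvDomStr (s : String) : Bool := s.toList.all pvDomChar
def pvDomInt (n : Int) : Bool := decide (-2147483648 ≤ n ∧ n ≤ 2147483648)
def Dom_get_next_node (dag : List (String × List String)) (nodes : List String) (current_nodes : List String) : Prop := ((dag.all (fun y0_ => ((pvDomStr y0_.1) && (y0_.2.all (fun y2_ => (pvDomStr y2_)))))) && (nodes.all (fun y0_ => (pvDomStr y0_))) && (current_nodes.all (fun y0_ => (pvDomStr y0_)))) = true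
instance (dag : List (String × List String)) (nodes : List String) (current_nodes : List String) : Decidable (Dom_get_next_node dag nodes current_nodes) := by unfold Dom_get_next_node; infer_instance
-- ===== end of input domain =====

-- B replaces A's sort-whole-dag-then-simulate-removals scan by a once-built availability
-- list, a count-comparison filter and min() over the satisfying keys (objective: simpler).
-- Both A and B also delete the returned key from dag in place (same side effect);
-- the equivalence proved here is about the RETURN value.

-- ===== PORT A =====
-- inner `for node in nodes` removal loop; the guard `node in is_it_next_nodes`
-- guarantees `remove` succeeds, so `.getD acc` is never the fallback
def pvRemoveLoop (pre : List String) (nodes current_nodes : List String) : List String :=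
  nodes.foldl (fun acc node =>
    if node ∈ current_nodes ∧ node ∈ acc then (PySem.List.remove? acc node).getD acc else acc) pre

-- the outer `for dep_node, pre_nodes in sorted_dag` loop with its early return
def pvALoop (nodes current_nodes : List String) : List (String × List String) → Option String
  | [] => none
  | (dep, pre) :: rest =>
    let is_it := pvRemoveLoop pre nodes current_nodes
    if is_it.length = 0 then some dep else pvALoop nodes current_nodes rest

def get_next_node (dag : List (String × List String)) (nodes : List String) (current_nodes : List String) : Option String :=
  pvALoop nodes current_nodes (PySem.List.sorted dag (fun kp => kp.1))

-- ===== PORT B =====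
def get_next_node_alt (dag : List (String × List String)) (nodes : List String) (current_nodes : List String) : Option String :=
  let avail := nodes.filter (fun n => decide (n ∈ current_nodes))
  let candidates := (dag.filter (fun kp =>
      kp.2.all (fun v => decide (PySem.List.count kp.2 v ≤ PySem.List.count avail v)))).map Prod.fst
  match candidates with
  | [] => none
  | _ => PySem.List.min? candidates (fun x => x)

-- ===== PRECONDITION & SPEC =====
def Spec_get_next_node (dag : List (String × List String)) (nodes : List String) (current_nodes : List String) (out : Option String) : Prop := out = get_next_node_alt dag nodes current_nodes
instance (dag : List (String × List String)) (nodes : List String) (current_nodes : List String) (out : Option String) : Decidable (Spec_get_next_node dag nodes current_nodes out) := by unfold Spec_get_next_node; infer_instance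

-- ===== CLAIM (what is proved, stated in full; the proofs are below) =====
def Claim_equal_get_next_node : Prop := ∀ (dag : List (String × List String)) (nodes : List String) (current_nodes : List String), Dom_get_next_node dag nodes current_nodes → Spec_get_next_node dag nodes current_nodes (get_next_node dag nodes current_nodes)

-- ===== LEMMAS AND PROOFS =====

-- A's guarded remove-loop over `nodes` is the erase-fold over the availability list
theorem pvRemoveLoop_eq_eraseFold (pre nodes cs : List String) :
    pvRemoveLoop pre nodes cs
      = (nodes.filter (fun n => decide (n ∈ cs))).foldl (fun acc n => acc.erase n) pre := by
  unfold pvRemoveLoop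
  induction nodes generalizing pre with
  | nil => rfl
  | cons n t ih =>
    by_cases hcs : n ∈ cs
    · rw [List.foldl_cons, List.filter_cons_of_pos (by simpa), List.foldl_cons]
      by_cases hmem : n ∈ pre
      · rw [if_pos ⟨hcs, hmem⟩, PySem.List.remove?_eq_some_erase _ _ hmem, Option.getD_some, ih]
      · rw [if_neg (by tauto), ih, List.erase_of_not_mem hmem]
    · rw [List.foldl_cons, List.filter_cons_of_neg (by simpa), if_neg (by tauto), ih]

theorem count_eraseFold (av : List String) (pre : List String) (v : String) :
    (av.foldl (fun acc n => acc.erase n) pre).count v = pre.count v - av.count v := by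
  induction av generalizing pre with
  | nil => simp
  | cons a t ih =>
    simp only [List.foldl_cons, ih, List.count_erase, List.count_cons]
    by_cases h : a = v
    · subst h; simp; omega
    · simp [h]

theorem eraseFold_eq_nil_iff (av : List String) (pre : List String) :
    av.foldl (fun acc n => acc.erase n) pre = [] ↔ ∀ v ∈ pre, pre.count v ≤ av.count v := by
  constructor
  · intro h v hv
    have he := count_eraseFold av pre v
    rw [h] at he
    simp only [List.count_nil] at he
    omega
  · intro h
    rw [List.eq_nil_iff_forall_not_mem]
    intro v hv
    have hc : 0 < (av.foldl (fun acc n => acc.erase n) pre).count v := List.count_pos_iff.mpr hv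
    have he := count_eraseFold av pre v
    have hm : v ∈ pre := List.count_pos_iff.mp (by omega)
    have := h v hm
    omega

-- A's per-entry emptiness test equals B's count-comparison predicate
theorem pvTest_eq (nodes cs : List String) (kp : String × List String) :
    (decide ((pvRemoveLoop kp.2 nodes cs).length = 0))
      = kp.2.all (fun v => decide (PySem.List.count kp.2 v
          ≤ PySem.List.count (nodes.filter (fun n => decide (n ∈ cs))) v)) := by
  rw [pvRemoveLoop_eq_eraseFold, Bool.eq_iff_iff]
  simp [PySem.List.count, List.length_eq_zero_iff, List.all_eq_true, eraseFold_eq_nil_iff]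

-- find? in a Pairwise-ordered list is minimal among satisfiers
theorem find?_min {α : Type} (R : α → α → Prop) (Q : α → Bool) (l : List α) (m x : α)
    (hp : l.Pairwise R) (hf : l.find? Q = some m) (hx : x ∈ l) (hQ : Q x = true) :
    R m x ∨ m = x := by
  induction l with
  | nil => simp at hf
  | cons h t ih =>
    rcases List.pairwise_cons.mp hp with ⟨hhd, htl⟩
    by_cases hQh : Q h = true
    · rw [List.find?_cons_of_pos hQh] at hf
      injection hf with hf; subst hf
      rcases List.mem_cons.mp hx with rfl | hxt
      · right; rfl
      · left; exact hhd x hxt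
    · rw [List.find?_cons_of_neg hQh] at hf
      rcases List.mem_cons.mp hx with rfl | hxt
      · exact absurd hQ hQh
      · exact ih htl hf hxt

-- A's outer loop is find? followed by the key projection
theorem pvALoop_eq_find? (nodes cs : List String) (l : List (String × List String)) :
    pvALoop nodes cs l
      = (l.find? (fun kp => decide ((pvRemoveLoop kp.2 nodes cs).length = 0))).map Prod.fst := by
  induction l with
  | nil => rfl
  | cons kp rest ih =>
    rcases kp with ⟨dep, pre⟩
    by_cases h : (pvRemoveLoop pre nodes cs).length = 0
    · simp only [pvALoop]
      rw [if_pos h, List.find?_cons_of_pos (by simpa using h)]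
      rfl
    · simp only [pvALoop]
      rw [if_neg h, ih, List.find?_cons_of_neg (by simpa using h)]

-- first satisfier of a key-sorted scan = first extremal key among all satisfiers
theorem find?sorted_eq_min? (dag : List (String × List String)) (Q : String × List String → Bool) :
    ((PySem.List.sorted dag (fun kp => kp.1)).find? Q).map Prod.fst
      = PySem.List.min? ((dag.filter Q).map Prod.fst) (fun x => x) := by
  have hperm : (PySem.List.sorted dag (fun kp => kp.1)).Perm dag :=
    PySem.List.sorted_perm dag (fun kp => kp.1) false
  rcases hfind : (PySem.List.sorted dag (fun kp => kp.1)).find? Q with _ | m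
  · have : dag.filter Q = [] := List.filter_eq_nil_iff.mpr
      (fun x hx => by simpa using List.find?_eq_none.mp hfind x (hperm.mem_iff.mpr hx))
    simp [this, PySem.List.min?]
  · have hQm : Q m = true := List.find?_some hfind
    have hmd : m ∈ dag := hperm.mem_iff.mp (List.mem_of_find?_eq_some hfind)
    have hmc : m.1 ∈ (dag.filter Q).map Prod.fst :=
      List.mem_map.mpr ⟨m, List.mem_filter.mpr ⟨hmd, hQm⟩, rfl⟩
    have hmin : ∀ k ∈ (dag.filter Q).map Prod.fst, m.1 ≤ k := by
      intro k hk
      rcases List.mem_map.mp hk with ⟨x, hxf, rfl⟩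
      rcases List.mem_filter.mp hxf with ⟨hxd, hQx⟩
      have hpw := PySem.List.sorted_pairwise dag (fun kp => kp.1)
      rcases find?_min _ Q _ m x hpw hfind (hperm.mem_iff.mpr hxd) hQx with h | h
      · exact h
      · exact le_of_eq (congrArg Prod.fst h)
    rcases hm' : PySem.List.min? ((dag.filter Q).map Prod.fst) (fun x => x) with _ | m'
    · rw [PySem.List.min?_eq_none_iff] at hm'
      rw [hm'] at hmc
      simp at hmc
    · have hm'mem := PySem.List.min?_mem hm'
      have h1 : m' ≤ m.1 := PySem.List.min?_isMin hm' m.1 hmc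
      have h2 : m.1 ≤ m' := hmin m' hm'mem
      simp [Option.map_some, le_antisymm h2 h1]

-- ===== VERDICT (by name: the statement is the Claim_ definition above) =====
theorem get_next_node_spec : Claim_equal_get_next_node := by
  intro dag nodes cs _
  unfold Spec_get_next_node get_next_node get_next_node_alt
  rw [pvALoop_eq_find?]
  have hQeq : (fun kp : String × List String => decide ((pvRemoveLoop kp.2 nodes cs).length = 0))
      = (fun kp : String × List String => kp.2.all (fun v =>
          decide (PySem.List.count kp.2 v
            ≤ PySem.List.count (nodes.filter (fun n => decide (n ∈ cs))) v))) := by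
    funext kp; exact pvTest_eq nodes cs kp
  rw [hQeq, find?sorted_eq_min?]
  rcases hcand : (dag.filter (fun kp : String × List String => kp.2.all (fun v =>
      decide (PySem.List.count kp.2 v
        ≤ PySem.List.count (nodes.filter (fun n => decide (n ∈ cs))) v)))).map Prod.fst with _ | ⟨c, cs'⟩
  · simp only [hcand]
    rfl
  · simp only [hcand]
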